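-- pv_equiv track=rewrite | github.com/E-Ranee/SPAN3013 | functions.py | nasal_allophones
-- ===== SOURCE A (Python) =====
-- def nasal_allophones(word, bilabial_phonemes, labiodental_phonemes, dental_phonemes, interdental_phonemes, alveolar_phonemes, palatal_phonemes, velar_phonemes):
--     """Checks what the next phoneme is"""
--     temp_word = list(word)
--     length = len(word)
--     for index in range(length-1):
--         if temp_word[index] == "N":
--             if temp_word[index+1].lower() in bilabial_phonemes:
--                 temp_word[index] = "m"
--             elif temp_word[index+1].lower() in labiodental_phonemes:
--                 temp_word[index] = "ɱ"
--             elif temp_word[index+1].lower() in dental_phonemes: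
--                 temp_word[index] = "n̪"
--             elif temp_word[index+1].lower() in interdental_phonemes:
--                 temp_word[index] = "n̟"
--             elif temp_word[index+1].lower() in velar_phonemes:
--                 temp_word[index] = "ŋ"
--             else:
--                 temp_word[index] = "n"
--
--     temp_word = "".join(temp_word)
--     return temp_word
-- ===== SOURCE B (Python) =====
-- def nasal_allophones(word, bilabial_phonemes, labiodental_phonemes, dental_phonemes, interdental_phonemes, alveolar_phonemes, palatal_phonemes, velar_phonemes):
--     """Checks what the next phoneme is"""
--     def symbol(nxt):
--         c = nxt.lower()
--         for phonemes, sym in ((bilabial_phonemes, "m"),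
--                               (labiodental_phonemes, "\u0271"),
--                               (dental_phonemes, "n\u032a"),
--                               (interdental_phonemes, "n\u031f"),
--                               (velar_phonemes, "\u014b")):
--             if c in phonemes:
--                 return sym
--         return "n"
--
--     parts = word.split("N")
--     acc = ""
--     k = 0
--     while k < len(parts) - 1:
--         head, nxt_seg = parts[k], parts[k + 1]
--         if nxt_seg == "" and k + 2 == len(parts):
--             return acc + head + "N"          # a word-final N is never rewritten
--         acc = acc + head + symbol(nxt_seg[0] if nxt_seg else "N")
--         k += 1
--     return acc + parts[k]
-- ===== Notes on version B (the rewrite author's own statement) =====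
-- stated objective: alternative
-- what changed: Instead of A's index loop mutating a char list with a five-way elif per 'N', B splits the word on 'N' once and rejoins the segments in a loop, classifying each separator from the head of the following segment (empty next segment means another N follows, or a word-final N which is kept verbatim).
import Mathlib
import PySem

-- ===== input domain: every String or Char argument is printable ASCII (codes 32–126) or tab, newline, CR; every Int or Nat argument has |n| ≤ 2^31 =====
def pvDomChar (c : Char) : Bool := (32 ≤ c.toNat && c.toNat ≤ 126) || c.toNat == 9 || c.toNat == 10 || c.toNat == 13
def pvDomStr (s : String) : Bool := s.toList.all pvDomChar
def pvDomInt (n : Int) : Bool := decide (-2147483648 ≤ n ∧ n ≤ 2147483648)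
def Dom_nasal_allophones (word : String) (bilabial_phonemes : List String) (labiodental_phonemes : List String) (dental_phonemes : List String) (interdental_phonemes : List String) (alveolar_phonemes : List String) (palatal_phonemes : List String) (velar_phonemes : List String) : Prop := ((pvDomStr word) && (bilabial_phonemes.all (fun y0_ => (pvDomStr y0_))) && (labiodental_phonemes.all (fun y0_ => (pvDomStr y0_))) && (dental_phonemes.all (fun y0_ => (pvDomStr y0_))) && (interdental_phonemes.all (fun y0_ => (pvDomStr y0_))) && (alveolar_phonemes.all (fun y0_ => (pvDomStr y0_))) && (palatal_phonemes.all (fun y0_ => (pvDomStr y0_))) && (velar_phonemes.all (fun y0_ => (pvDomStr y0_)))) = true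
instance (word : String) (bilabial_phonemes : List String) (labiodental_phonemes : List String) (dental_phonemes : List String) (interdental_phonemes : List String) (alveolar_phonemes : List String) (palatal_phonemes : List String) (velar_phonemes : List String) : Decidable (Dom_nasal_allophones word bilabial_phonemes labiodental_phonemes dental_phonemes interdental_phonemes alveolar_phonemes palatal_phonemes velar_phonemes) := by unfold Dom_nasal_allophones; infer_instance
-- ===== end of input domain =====

-- B splits the word on "N" once and rejoins the segments in a loop, classifying each separator from the head of the following segment, instead of A's index loop over a mutated char list (alternative decomposition, similar cost).


-- ===== PORT A =====
-- A's loop body as a named helper (exact transliteration of the if/elif chain over temp_word)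
def nasalStep (bilabial_phonemes labiodental_phonemes dental_phonemes interdental_phonemes velar_phonemes : List String) (tw : List String) (index : Int) : List String :=
  if PySem.List.pyGetD tw index "" = "N" then
    let nxt := PySem.Str.lower (PySem.List.pyGetD tw (index + 1) "")
    if nxt ∈ bilabial_phonemes then PySem.List.pySetD tw index "m"
    else if nxt ∈ labiodental_phonemes then PySem.List.pySetD tw index "ɱ"
    else if nxt ∈ dental_phonemes then PySem.List.pySetD tw index "n̪"
    else if nxt ∈ interdental_phonemes then PySem.List.pySetD tw index "n̟"
    else if nxt ∈ velar_phonemes then PySem.List.pySetD tw index "ŋ"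
    else PySem.List.pySetD tw index "n"
  else tw

def nasal_allophones (word : String) (bilabial_phonemes : List String) (labiodental_phonemes : List String) (dental_phonemes : List String) (interdental_phonemes : List String) (alveolar_phonemes : List String) (palatal_phonemes : List String) (velar_phonemes : List String) : String :=
  let temp_word : List String := word.toList.map (fun c => String.ofList [c])
  let length : Int := PySem.Str.len word
  let temp_word :=
    (PySem.List.pyRange 0 (length - 1) 1).foldl
      (nasalStep bilabial_phonemes labiodental_phonemes dental_phonemes interdental_phonemes velar_phonemes)
      temp_word
  PySem.Str.join "" temp_word

-- ===== PORT B =====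
-- Source B's inner 'symbol': a for-loop over the (category, symbol) table with early return
def symLoopB (c : String) : List (List String × String) → String
  | [] => "n"
  | (ps, sym) :: rest => if c ∈ ps then sym else symLoopB c rest

-- Source B's while loop over the list of N-delimited segments, with the accumulated output
-- string as 'acc' ([] case is a totality guard only: str.split is never empty)
def rejoinGo (bil lab den inter vel : List String) (acc : List Char) : List (List Char) → List Char
  | [] => acc
  | [p] => acc ++ p
  | p :: r0 :: rs =>
      if r0 = [] ∧ rs = [] then acc ++ p ++ "N".toList
      else
        let nxt : String := match r0 with | [] => "N" | c :: _ => String.ofList [c]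
        rejoinGo bil lab den inter vel
          (acc ++ p ++ (symLoopB (PySem.Str.lower nxt)
            [(bil, "m"), (lab, "ɱ"), (den, "n̪"), (inter, "n̟"), (vel, "ŋ")]).toList)
          (r0 :: rs)

def nasal_allophones_alt (word : String) (bilabial_phonemes : List String) (labiodental_phonemes : List String) (dental_phonemes : List String) (interdental_phonemes : List String) (alveolar_phonemes : List String) (palatal_phonemes : List String) (velar_phonemes : List String) : String :=
  String.ofList
    (rejoinGo bilabial_phonemes labiodental_phonemes dental_phonemes interdental_phonemes velar_phonemes
      [] (PySem.Chars.splitOn word.toList "N".toList))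

-- ===== PRECONDITION & SPEC =====
def Spec_nasal_allophones (word : String) (bilabial_phonemes : List String) (labiodental_phonemes : List String) (dental_phonemes : List String) (interdental_phonemes : List String) (alveolar_phonemes : List String) (palatal_phonemes : List String) (velar_phonemes : List String) (out : String) : Prop := out = nasal_allophones_alt word bilabial_phonemes labiodental_phonemes dental_phonemes interdental_phonemes alveolar_phonemes palatal_phonemes velar_phonemes
instance (word : String) (bilabial_phonemes : List String) (labiodental_phonemes : List String) (dental_phonemes : List String) (interdental_phonemes : List String) (alveolar_phonemes : List String) (palatal_phonemes : List String) (velar_phonemes : List String) (out : String) : Decidable (Spec_nasal_allophones word bilabial_phonemes labiodental_phonemes dental_phonemes interdental_phonemes alveolar_phonemes palatal_phonemes velar_phonemes out) := by unfold Spec_nasal_allophones; infer_instance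

-- ===== CLAIM (what is proved, stated in full; the proofs are below) =====
def Claim_equal_nasal_allophones : Prop := ∀ (word : String) (bilabial_phonemes : List String) (labiodental_phonemes : List String) (dental_phonemes : List String) (interdental_phonemes : List String) (alveolar_phonemes : List String) (palatal_phonemes : List String) (velar_phonemes : List String), Dom_nasal_allophones word bilabial_phonemes labiodental_phonemes dental_phonemes interdental_phonemes alveolar_phonemes palatal_phonemes velar_phonemes → Spec_nasal_allophones word bilabial_phonemes labiodental_phonemes dental_phonemes interdental_phonemes alveolar_phonemes palatal_phonemes velar_phonemes (nasal_allophones word bilabial_phonemes labiodental_phonemes dental_phonemes interdental_phonemes alveolar_phonemes palatal_phonemes velar_phonemes)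

-- ===== LEMMAS AND PROOFS =====

-- proof-side recursive form of Source B's while loop (the loop with the accumulator made explicit)
def rejoinB (bil lab den inter vel : List String) : List (List Char) → List Char
  | [] => []
  | [p] => p
  | p :: r0 :: rs =>
      if r0 = [] ∧ rs = [] then p ++ "N".toList
      else
        let nxt : String := match r0 with | [] => "N" | c :: _ => String.ofList [c]
        p ++ (symLoopB (PySem.Str.lower nxt)
                [(bil, "m"), (lab, "ɱ"), (den, "n̪"), (inter, "n̟"), (vel, "ŋ")]).toList
          ++ rejoinB bil lab den inter vel (r0 :: rs)

theorem rejoinGo_eq (bil lab den inter vel : List String) (l : List (List Char)) :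
    ∀ acc : List Char,
    rejoinGo bil lab den inter vel acc l = acc ++ rejoinB bil lab den inter vel l := by
  induction l with
  | nil => intro acc; simp [rejoinGo, rejoinB]
  | cons p l' ih =>
    intro acc
    cases l' with
    | nil => simp [rejoinGo, rejoinB]
    | cons r0 rs =>
      simp only [rejoinGo, rejoinB]
      split_ifs with h
      · simp
      · rw [ih]
        simp

theorem ofList_singleton_eq_N (c : Char) : (String.ofList [c] = "N") ↔ c = 'N' := by
  constructor
  · intro h
    have h2 := congrArg String.toList h
    simpa using h2
  · rintro rfl; rfl

-- the value A's elif chain assigns for a (lowered) following phoneme s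
def nasalChain (bil lab den inter vel : List String) (s : String) : String :=
  if s ∈ bil then "m" else if s ∈ lab then "ɱ" else if s ∈ den then "n̪"
  else if s ∈ inter then "n̟" else if s ∈ vel then "ŋ" else "n"

-- the per-position transformation A computes, as a function of (current, next) char
def nasalF (bil lab den inter vel : List String) (p : Char × Char) : String :=
  if p.1 = 'N' then nasalChain bil lab den inter vel (PySem.Str.lower (String.ofList [p.2]))
  else String.ofList [p.1]

-- B's symbol loop over the table computes exactly A's elif chain
theorem symLoopB_eq_chain (bil lab den inter vel : List String) (s : String) :
    symLoopB s [(bil, "m"), (lab, "ɱ"), (den, "n̪"), (inter, "n̟"), (vel, "ŋ")]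
      = nasalChain bil lab den inter vel s := by
  simp [symLoopB, nasalChain]

-- A's result as a structural recursion over the character list
def specA (bil lab den inter vel : List String) : List Char → List Char
  | [] => []
  | [c] => [c]
  | c :: d :: rest =>
      (nasalF bil lab den inter vel (c, d)).toList ++ specA bil lab den inter vel (d :: rest)

-- invariant of A's loop: after the first k indices, the first k positions carry nasalF
-- of the ORIGINAL adjacent pair and the rest is still the original characters
theorem loopA (bil lab den inter vel : List String) (cs : List Char) (k : Nat)
    (hk : k + 1 ≤ cs.length) :
    (PySem.List.pyRange 0 (k : Int) 1).foldl (nasalStep bil lab den inter vel)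
      (cs.map (fun c => String.ofList [c]))
      = ((cs.zip cs.tail).take k).map (nasalF bil lab den inter vel)
        ++ (cs.drop k).map (fun c => String.ofList [c]) := by
  induction k with
  | zero => simp [PySem.List.pyRange_one_eq_nil]
  | succ k ih =>
    have hkn : k < cs.length := by omega
    have hk1 : k + 1 < cs.length := by omega
    have hzip : (cs.zip cs.tail).length = cs.length - 1 := by
      rw [List.length_zip, List.length_tail]; omega
    rw [show ((k + 1 : Nat) : Int) = (k : Int) + 1 by push_cast; ring,
      PySem.List.pyRange_one_succ_right (by positivity), List.foldl_append,
      ih (by omega), List.foldl_cons, List.foldl_nil]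
    have hP : (((cs.zip cs.tail).take k).map (nasalF bil lab den inter vel)).length = k := by
      rw [List.length_map, List.length_take, hzip]; omega
    have hdrop : cs.drop k = cs[k] :: cs.drop (k + 1) := List.drop_eq_getElem_cons hkn
    have hdrop1 : cs.drop (k + 1) = cs[k + 1] :: cs.drop (k + 2) := List.drop_eq_getElem_cons hk1
    have hQ : (List.map (fun c => String.ofList [c]) cs).drop k
        = String.ofList [cs[k]] :: (List.map (fun c => String.ofList [c]) cs).drop (k + 1) := by
      rw [List.drop_eq_getElem_cons (by simpa using hkn)]; simp
    have hgetk : PySem.List.pyGetD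
        (((cs.zip cs.tail).take k).map (nasalF bil lab den inter vel)
          ++ (cs.drop k).map (fun c => String.ofList [c])) (k : Int) ""
        = String.ofList [cs[k]] := by
      rw [PySem.List.pyGetD_natCast, List.getD_eq_getElem?_getD,
        List.getElem?_append_right (by omega), hP, Nat.sub_self, hdrop]
      simp [List.getElem?_eq_getElem hkn]
    have hgetk1 : PySem.List.pyGetD
        (((cs.zip cs.tail).take k).map (nasalF bil lab den inter vel)
          ++ (cs.drop k).map (fun c => String.ofList [c])) ((k : Int) + 1) ""
        = String.ofList [cs[k + 1]] := by
      rw [show ((k : Int) + 1) = ((k + 1 : Nat) : Int) by push_cast; ring,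
        PySem.List.pyGetD_natCast, List.getD_eq_getElem?_getD,
        List.getElem?_append_right (by omega), hP, hdrop, hdrop1]
      simp [List.getElem?_eq_getElem hk1]
    have hset : ∀ v : String, PySem.List.pySetD
        (((cs.zip cs.tail).take k).map (nasalF bil lab den inter vel)
          ++ (cs.drop k).map (fun c => String.ofList [c])) (k : Int) v
        = ((cs.zip cs.tail).take k).map (nasalF bil lab den inter vel)
          ++ v :: (cs.drop (k + 1)).map (fun c => String.ofList [c]) := by
      intro v
      rw [PySem.List.pySetD_natCast, List.set_append, hP]
      simp [hQ]
    have htake : ((cs.zip cs.tail).take (k + 1)).map (nasalF bil lab den inter vel)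
        = ((cs.zip cs.tail).take k).map (nasalF bil lab den inter vel)
          ++ [nasalF bil lab den inter vel (cs[k], cs[k + 1])] := by
      have hz : (cs.zip cs.tail)[k]? = some (cs[k], cs[k + 1]) := by
        rw [List.getElem?_eq_getElem (by omega)]
        simp [List.getElem_zip, List.getElem_tail]
      rw [List.take_add_one, hz]
      simp
    rw [htake]
    by_cases hc : cs[k] = 'N'
    · rw [nasalStep, if_pos (by rw [hgetk, ofList_singleton_eq_N]; exact hc), hgetk1]
      simp only [hset, nasalF, nasalChain, hc, List.append_assoc,
        List.singleton_append]
      split_ifs <;> rfl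
    · rw [nasalStep, if_neg (by rw [hgetk, ofList_singleton_eq_N]; exact hc)]
      have : nasalF bil lab den inter vel (cs[k], cs[k + 1]) = String.ofList [cs[k]] := by
        simp [nasalF, hc]
      rw [this]
      simp [hQ]

-- the joined loop output is specA (character level)
theorem join_ref_eq_specA (bil lab den inter vel : List String) (cs : List Char) (h : cs ≠ []) :
    (((cs.zip cs.tail).map (nasalF bil lab den inter vel)).map String.toList).flatten
        ++ [cs.getLast h]
      = specA bil lab den inter vel cs := by
  induction cs with
  | nil => exact absurd rfl h
  | cons c cs' ih =>
    cases cs' with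
    | nil => simp [specA]
    | cons d rest =>
      simp only [List.tail_cons, List.zip_cons_cons, List.map_cons, List.flatten_cons,
        List.getLast_cons (by simp : (d :: rest) ≠ [])]
      have hih := ih (by simp)
      simp only [List.tail_cons] at hih
      rw [List.append_assoc, hih]
      rfl

-- PySem's splitOn with a single-character separator is core splitOnP
theorem chars_splitOn_go_eq (x : Char) (fuel : Nat) :
    ∀ (l cur : List Char) (acc : List (List Char)), l.length < fuel →
    PySem.Chars.splitOn.go [x] fuel l cur acc
      = acc.reverse ++ (List.splitOnP (· == x) l).modifyHead (cur.reverse ++ ·) := by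
  induction fuel with
  | zero => intro l cur acc h; omega
  | succ fuel ih =>
    intro l cur acc h
    cases l with
    | nil => simp [PySem.Chars.splitOn.go, List.splitOnP_nil]
    | cons c rest =>
      rw [PySem.Chars.splitOn.go]
      by_cases hc : c = x
      · subst hc
        rw [if_pos (by simp [List.isPrefixOf])]
        have hdrop : List.drop [c].length (c :: rest) = rest := rfl
        rw [hdrop, ih rest [] (cur.reverse :: acc) (by simp at h ⊢; omega),
          List.splitOnP_cons, if_pos (by simp)]
        obtain ⟨q, qs, hq⟩ := List.exists_cons_of_ne_nil (List.splitOnP_ne_nil (· == c) rest)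
        rw [hq]
        simp
      · rw [if_neg (by simp [List.isPrefixOf, Ne.symm hc])]
        rw [ih _ _ _ (by simp at h ⊢; omega)]
        rw [List.splitOnP_cons, if_neg (by simp [hc])]
        obtain ⟨q, qs, hq⟩ := List.exists_cons_of_ne_nil (List.splitOnP_ne_nil (· == x) rest)
        rw [hq]
        simp

theorem chars_splitOn_eq (x : Char) (cs : List Char) :
    PySem.Chars.splitOn cs [x] = List.splitOnP (· == x) cs := by
  rw [PySem.Chars.splitOn, chars_splitOn_go_eq x _ _ _ _ (by omega)]
  obtain ⟨q, qs, hq⟩ := List.exists_cons_of_ne_nil (List.splitOnP_ne_nil (· == x) cs)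
  rw [hq]; simp

-- rejoinB only looks at the tail to decide the branch, so a longer head passes through
theorem rejoinB_cons_head (bil lab den inter vel : List String) (c : Char) (q : List Char)
    (ps : List (List Char)) :
    rejoinB bil lab den inter vel ((c :: q) :: ps)
      = c :: rejoinB bil lab den inter vel (q :: ps) := by
  cases ps with
  | nil => rfl
  | cons p1 ps' => simp only [rejoinB]; split_ifs <;> simp

theorem specA_cons_ne (bil lab den inter vel : List String) (c : Char) (l : List Char)
    (hc : c ≠ 'N') :
    specA bil lab den inter vel (c :: l) = c :: specA bil lab den inter vel l := by
  cases l with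
  | nil => rfl
  | cons d rest => simp [specA, nasalF, hc]

-- the heart: A's per-position recursion equals B's rejoin over the N-split
theorem specA_eq_rejoinB (bil lab den inter vel : List String) (cs : List Char) :
    specA bil lab den inter vel cs
      = rejoinB bil lab den inter vel (List.splitOnP (· == 'N') cs) := by
  induction cs with
  | nil => simp [List.splitOnP_nil, specA, rejoinB]
  | cons c cs' ih =>
    rw [List.splitOnP_cons]
    by_cases hc : c = 'N'
    · subst hc
      rw [if_pos (by simp)]
      cases cs' with
      | nil => simp [List.splitOnP_nil, specA, rejoinB]
      | cons d rest =>
        by_cases hd : d = 'N'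
        · subst hd
          rw [List.splitOnP_cons, if_pos (by simp)] at ih ⊢
          simp only [rejoinB]
          rw [symLoopB_eq_chain]
          simp only [specA, ih, nasalF]
          simp
          intro hX
          exact absurd hX (List.splitOnP_ne_nil _ rest)
        · rw [List.splitOnP_cons, if_neg (by simp [hd])] at ih ⊢
          obtain ⟨u, us, hu⟩ := List.exists_cons_of_ne_nil (List.splitOnP_ne_nil (· == 'N') rest)
          rw [hu] at ih ⊢
          simp only [List.modifyHead] at ih ⊢
          simp only [rejoinB, if_neg (show ¬(d :: u = ([] : List Char) ∧ us = []) from by simp)]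
          rw [symLoopB_eq_chain]
          simp only [specA, ih, nasalF]
          simp
    · rw [if_neg (by simp [hc])]
      obtain ⟨q, qs, hq⟩ := List.exists_cons_of_ne_nil (List.splitOnP_ne_nil (· == 'N') cs')
      rw [hq] at ih ⊢
      simp only [List.modifyHead]
      rw [rejoinB_cons_head, ← ih, specA_cons_ne _ _ _ _ _ _ _ hc]

theorem intercalate_nil_eq_flatten {α : Type} (l : List (List α)) :
    [].intercalate l = l.flatten := by
  induction l with
  | nil => rfl
  | cons a l ih =>
    cases l with
    | nil => simp [List.intercalate]
    | cons b l' =>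
      rw [show List.intercalate [] (a :: b :: l') = a ++ List.intercalate [] (b :: l') from by
          simp [List.intercalate, List.intersperse], ih]
      rfl

theorem chars_join_nil_sep (l : List (List Char)) : PySem.Chars.join [] l = l.flatten := by
  simp only [PySem.Chars.join]
  exact intercalate_nil_eq_flatten l

-- ===== VERDICT (by name: the statement is the Claim_ definition above) =====
theorem nasal_allophones_spec : Claim_equal_nasal_allophones := by
  unfold Claim_equal_nasal_allophones
  intro word bil lab den inter alv pal vel _
  unfold Spec_nasal_allophones
  simp only [nasal_allophones, nasal_allophones_alt]
  rw [show ("N" : String).toList = ['N'] from rfl, chars_splitOn_eq, rejoinGo_eq,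
    List.nil_append, ← specA_eq_rejoinB]
  by_cases hne : word.toList = []
  · have h0 : word.toList.length = 0 := by rw [hne]; rfl
    have hlen : PySem.Str.len word = (word.toList.length : Int) := by
      simp [PySem.Str.len_eq]
    rw [hlen, h0, hne]
    rw [show ((0 : Nat) : Int) - 1 = -1 from by norm_num,
      PySem.List.pyRange_one_eq_nil (by norm_num)]
    simp [specA, PySem.Str.join]
  · have hn : 0 < word.toList.length := List.length_pos_of_ne_nil hne
    have hlen : PySem.Str.len word = (word.toList.length : Int) := by
      simp [PySem.Str.len_eq]
    have hzip : (word.toList.zip word.toList.tail).length = word.toList.length - 1 := by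
      rw [List.length_zip, List.length_tail]; omega
    rw [hlen, show (word.toList.length : Int) - 1 = ((word.toList.length - 1 : Nat) : Int)
        from by omega,
      loopA bil lab den inter vel word.toList (word.toList.length - 1) (by omega),
      List.take_of_length_le (le_of_eq hzip), List.drop_length_sub_one hne]
    apply String.toList_inj.mp
    rw [PySem.Str.toList_join,
      show ("" : String).toList = ([] : List Char) from rfl, chars_join_nil_sep]
    simp only [List.map_append, List.map_map, List.map_cons, List.map_nil,
      List.flatten_append]
    rw [show [(String.ofList [word.toList.getLast hne]).toList].flatten
        = [word.toList.getLast hne] from by simp,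
      ← List.map_map]
    rw [join_ref_eq_specA bil lab den inter vel word.toList hne]
    simp
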